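-- pv_equiv track=rewrite | github.com/Alihoe/sieve_projectwork | src/ner.py | find_top_matches_with_threshold
-- ===== SOURCE A (Python) =====
-- def find_top_matches_with_threshold(entities_a, ids_a, entities_b, ids_b, threshold):
--     result = []
--     weak_matches = []
--
--     b_entity_sets = {b_id: set(entities) for b_id, entities in zip(ids_b, entities_b)}
--
--     for a_entities, a_id in zip(entities_a, ids_a):
--         a_set = set(a_entities)
--         max_match = 0
--         scores = []
--
--         for b_id, b_set in b_entity_sets.items():
--             intersection = len(a_set & b_set)
--             scores.append((intersection, b_id))
--             if intersection > max_match: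
--                 max_match = intersection
--
--         scores.sort(reverse=True)
--         top_matches = [b_id for _, b_id in scores[:5]]
--         result.append(top_matches)
--
--         if max_match < threshold:
--             weak_matches.append(a_id)
--
--     return result, weak_matches
-- ===== SOURCE B (Python) =====
-- def find_top_matches_with_threshold(entities_a, ids_a, entities_b, ids_b, threshold):
--     result = []
--     weak_matches = []
--
--     b_entity_sets = {b_id: set(entities) for b_id, entities in zip(ids_b, entities_b)}
--
--     # inverted index: entity -> ids of the b-items whose entity set contains it
--     index = {}
--     for b_id, b_set in b_entity_sets.items():
--         for entity in b_set:
--             index[entity] = index.get(entity, []) + [b_id]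
--
--     for a_entities, a_id in zip(entities_a, ids_a):
--         counts = {}
--         for entity in set(a_entities):
--             for b_id in index.get(entity, []):
--                 counts[b_id] = counts.get(b_id, 0) + 1
--
--         scores = [(counts.get(b_id, 0), b_id) for b_id in b_entity_sets]
--         if max((c for c, _ in scores), default=0) < threshold:
--             weak_matches.append(a_id)
--
--         scores.sort(reverse=True)
--         result.append([b_id for _, b_id in scores[:5]])
--
--     return result, weak_matches
-- ===== Notes on version B (the rewrite author's own statement) =====
-- stated objective: faster
-- what changed: Replaces A's per-item scan intersecting the query entity set with every b entity set by an inverted index (entity -> b_ids) built once, from which per-item intersection counts are accumulated only for entities actually shared; scores over all b_ids (zero-filled), the same tuple sort and top-5 slice, and max(..., default=0) instead of A's running max.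
import Mathlib
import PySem

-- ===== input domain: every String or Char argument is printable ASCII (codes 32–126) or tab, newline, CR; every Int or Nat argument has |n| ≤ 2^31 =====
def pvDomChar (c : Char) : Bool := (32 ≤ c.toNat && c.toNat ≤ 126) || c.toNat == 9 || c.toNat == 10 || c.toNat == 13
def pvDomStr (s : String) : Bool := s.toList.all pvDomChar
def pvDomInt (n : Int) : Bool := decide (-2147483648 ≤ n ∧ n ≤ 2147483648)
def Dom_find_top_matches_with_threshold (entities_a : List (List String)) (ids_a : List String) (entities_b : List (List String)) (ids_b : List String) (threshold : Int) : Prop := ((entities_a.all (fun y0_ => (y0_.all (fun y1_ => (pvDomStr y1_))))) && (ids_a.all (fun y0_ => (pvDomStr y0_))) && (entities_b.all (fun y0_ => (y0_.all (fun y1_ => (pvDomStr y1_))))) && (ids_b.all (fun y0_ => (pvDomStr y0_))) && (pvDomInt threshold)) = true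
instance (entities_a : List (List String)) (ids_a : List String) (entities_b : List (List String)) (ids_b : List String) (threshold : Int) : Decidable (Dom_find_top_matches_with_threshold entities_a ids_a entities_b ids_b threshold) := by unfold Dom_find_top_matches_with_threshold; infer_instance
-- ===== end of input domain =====

-- B replaces A's per-a scan over all b entity sets (set intersections) with an inverted index
-- entity → b_ids built once, accumulating intersection counts only for entities actually shared;
-- same exact output; a timing run measured B faster on the generated inputs.

-- ===== PORT A =====
def find_top_matches_with_threshold (entities_a : List (List String)) (ids_a : List String) (entities_b : List (List String)) (ids_b : List String) (threshold : Int) : List (List String) × List String :=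
  let b_entity_sets : PySem.Dict String (PySem.Set String) :=
    (ids_b.zip entities_b).foldl (fun d p => d.insert p.1 (PySem.Set.ofList p.2)) PySem.Dict.empty
  (entities_a.zip ids_a).foldl (fun acc p =>
    let a_set := PySem.Set.ofList p.1
    -- inner loop: running max_match and scores list
    let st := b_entity_sets.items.foldl (fun (st : Int × List (Int × String)) q =>
      let intersection := PySem.Set.len (PySem.Set.inter a_set q.2)
      let scores := st.2 ++ [(intersection, q.1)]
      (if intersection > st.1 then intersection else st.1, scores)) (0, [])
    let scores := PySem.List.sorted2 st.2 Prod.fst Prod.snd true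
    let top_matches := (PySem.List.slice scores none (some 5)).map Prod.snd
    (acc.1 ++ [top_matches], if st.1 < threshold then acc.2 ++ [p.2] else acc.2))
    ([], [])

-- ===== PORT B =====
def find_top_matches_with_threshold_alt (entities_a : List (List String)) (ids_a : List String) (entities_b : List (List String)) (ids_b : List String) (threshold : Int) : List (List String) × List String :=
  let b_entity_sets : PySem.Dict String (PySem.Set String) :=
    (ids_b.zip entities_b).foldl (fun d p => d.insert p.1 (PySem.Set.ofList p.2)) PySem.Dict.empty
  let index : PySem.Dict String (List String) :=
    b_entity_sets.items.foldl (fun d q =>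
      q.2.foldl (fun d entity => d.modify entity [] (fun l => l ++ [q.1])) d) PySem.Dict.empty
  (entities_a.zip ids_a).foldl (fun acc p =>
    let counts : PySem.Dict String Int :=
      (PySem.Set.ofList p.1).foldl (fun c entity =>
        (index.getD entity []).foldl (fun c b_id => c.modify b_id 0 (fun x => x + 1)) c)
        PySem.Dict.empty
    let scores := b_entity_sets.keys.map (fun b_id => (counts.getD b_id 0, b_id))
    let weak := if PySem.List.maxD (scores.map Prod.fst) (fun c => c) 0 < threshold
                then acc.2 ++ [p.2] else acc.2
    let ranked := PySem.List.sorted2 scores Prod.fst Prod.snd true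
    (acc.1 ++ [(PySem.List.slice ranked none (some 5)).map Prod.snd], weak))
    ([], [])

-- ===== PRECONDITION & SPEC =====
def Spec_find_top_matches_with_threshold (entities_a : List (List String)) (ids_a : List String) (entities_b : List (List String)) (ids_b : List String) (threshold : Int) (out : List (List String) × List String) : Prop := out = find_top_matches_with_threshold_alt entities_a ids_a entities_b ids_b threshold
instance (entities_a : List (List String)) (ids_a : List String) (entities_b : List (List String)) (ids_b : List String) (threshold : Int) (out : List (List String) × List String) : Decidable (Spec_find_top_matches_with_threshold entities_a ids_a entities_b ids_b threshold out) := by unfold Spec_find_top_matches_with_threshold; infer_instance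

-- ===== CLAIM (what is proved, stated in full; the proofs are below) =====
def Claim_equal_find_top_matches_with_threshold : Prop := ∀ (entities_a : List (List String)) (ids_a : List String) (entities_b : List (List String)) (ids_b : List String) (threshold : Int), Dom_find_top_matches_with_threshold entities_a ids_a entities_b ids_b threshold → Spec_find_top_matches_with_threshold entities_a ids_a entities_b ids_b threshold (find_top_matches_with_threshold entities_a ids_a entities_b ids_b threshold)

-- ===== LEMMAS AND PROOFS =====

-- L1: A's inner loop splits into (running max over the scores, the scores list appended).
theorem pvL1 (items : List (String × PySem.Set String)) (g : PySem.Set String → Int)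
    (m : Int) (sc : List (Int × String)) :
    items.foldl (fun (st : Int × List (Int × String)) q =>
        (if g q.2 > st.1 then g q.2 else st.1, st.2 ++ [(g q.2, q.1)])) (m, sc)
      = ((items.map (fun q => g q.2)).foldl (fun m c => if c > m then c else m) m,
         sc ++ items.map (fun q => (g q.2, q.1))) := by
  induction items generalizing m sc with
  | nil => simp
  | cons q rest ih => simp [ih]

-- L2: the inverted index at key e lists exactly the b_ids of the pairs (e, b_id).
theorem pvL2 (items : List (String × PySem.Set String)) (e : String) :
    ((items.foldl (fun d q =>
        q.2.foldl (fun d entity => d.modify entity [] (fun l => l ++ [q.1])) d)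
        (PySem.Dict.empty : PySem.Dict String (List String))).getD e [])
      = (((items.flatMap (fun q => q.2.map (fun ent => (ent, q.1)))).filter
            (fun pr => pr.1 == e)).map (fun pr => pr.2)) := by
  have h : (items.foldl (fun d q =>
        q.2.foldl (fun d entity => d.modify entity [] (fun l => l ++ [q.1])) d)
        (PySem.Dict.empty : PySem.Dict String (List String)))
      = ((items.flatMap (fun q => q.2.map (fun ent => (ent, q.1)))).foldl
          (fun d pr => d.modify pr.1 [] (fun l => l ++ [pr.2])) PySem.Dict.empty) := by
    rw [List.foldl_flatMap]
    simp [List.foldl_map]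
  rw [h, PySem.Dict.getD_foldl_modify_append]
  simp [PySem.Dict.empty, PySem.Dict.getD, PySem.Dict.get?]

-- L3: counting a fixed b_id among the (entity, b_id) pairs at entity e is a membership test.
theorem pvL3 (items : List (String × PySem.Set String)) (b : String) (v : PySem.Set String)
    (e : String) (hnd : (items.map Prod.fst).Nodup) (hv : ∀ q ∈ items, List.Nodup q.2)
    (hb : (b, v) ∈ items) :
    ((items.flatMap (fun q => q.2.map (fun ent => (ent, q.1)))).countP
        (fun pr => pr.2 == b && pr.1 == e))
      = if e ∈ v then 1 else 0 := by
  induction items with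
  | nil => cases hb
  | cons q rest ih =>
    simp only [List.flatMap_cons, List.countP_append, List.countP_map]
    have hnd' : (rest.map Prod.fst).Nodup := (List.nodup_cons.mp hnd).2
    have hq1 : q.1 ∉ rest.map Prod.fst := (List.nodup_cons.mp hnd).1
    rcases List.mem_cons.mp hb with hq | hmem
    · have hb1 : q.1 = b := by rw [← hq]
      have hb2 : q.2 = v := by rw [← hq]
      have hrest : (rest.flatMap (fun q => q.2.map (fun ent => (ent, q.1)))).countP
          (fun pr => pr.2 == b && pr.1 == e) = 0 := by
        apply List.countP_eq_zero.mpr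
        intro pr hpr
        rcases List.mem_flatMap.mp hpr with ⟨q', hq', hpr'⟩
        rcases List.mem_map.mp hpr' with ⟨ent, _, rfl⟩
        have : q'.1 ≠ b := by
          intro hc
          exact hq1 (hb1 ▸ hc ▸ List.mem_map.mpr ⟨q', hq', rfl⟩)
        simp [this]
      rw [hrest]
      have hvnd : v.Nodup := hb2 ▸ hv q (List.mem_cons_self)
      have hcount : (q.2.countP ((fun pr => pr.2 == b && pr.1 == e) ∘ (fun ent => (ent, q.1))))
          = v.count e := by
        simp [hb1, hb2, List.count]
        congr 1
        funext ent
        simp [BEq.comm]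
      rw [hcount]
      by_cases hev : e ∈ v
      · simp [hev, List.count_eq_one_of_mem hvnd hev]
      · simp [hev, List.count_eq_zero.mpr hev]
    · have hq1b : q.1 ≠ b := by
        intro hc
        exact hq1 (hc ▸ List.mem_map.mpr ⟨(b, v), hmem, rfl⟩)
      have hhead : (q.2.countP ((fun pr => pr.2 == b && pr.1 == e) ∘ (fun ent => (ent, q.1)))) = 0 := by
        apply List.countP_eq_zero.mpr
        intro ent _
        simp [hq1b]
      rw [hhead, ih hnd' (fun q hq => hv q (List.mem_cons_of_mem _ hq)) hmem]
      omega

-- L4: B's nested counting loop accumulates, per b_id, the sum of its counts in the index rows.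
theorem pvL4 (l : List String) (idx : PySem.Dict String (List String))
    (c0 : PySem.Dict String Int) (b : String) :
    ((l.foldl (fun c entity =>
        (idx.getD entity []).foldl (fun c b_id => c.modify b_id 0 (fun x => x + 1)) c) c0).getD b 0)
      = c0.getD b 0 + (l.map (fun e => (((idx.getD e []).count b : Nat) : Int))).sum := by
  induction l generalizing c0 with
  | nil => simp
  | cons e rest ih => simp [ih, PySem.Dict.getD_foldl_modify_add_one]; ring

-- L5: Python's running max from 0 equals max(..., default=0) on a list of nonnegatives.
theorem pvL5 (l : List Int) (h : ∀ x ∈ l, 0 ≤ x) :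
    l.foldl (fun m c => if c > m then c else m) 0 = PySem.List.maxD l (fun c => c) 0 := by
  cases l with
  | nil => rfl
  | cons x rest =>
    have hx : (0:Int) ≤ x := h x (by simp)
    have h0 : (if x > (0:Int) then x else 0) = x := by omega
    simp only [PySem.List.maxD, PySem.List.max?, List.foldl_cons, h0]
    clear h
    induction rest generalizing x with
    | nil => rfl
    | cons y t ih =>
      simp only [List.foldl_cons]
      by_cases hy : x < y
      · have hy' : (0:Int) ≤ y := le_of_lt (lt_of_le_of_lt hx hy)
        simpa [hy, gt_iff_lt] using ih y hy' (by omega)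
      · simpa [hy, gt_iff_lt] using ih x hx h0

-- values inserted into the b dict are Python sets, hence duplicate-free
theorem pvValsNodup (l : List (String × List String)) (d : PySem.Dict String (PySem.Set String))
    (hd : ∀ q ∈ d.items, List.Nodup q.2) :
    ∀ q ∈ (l.foldl (fun d p => d.insert p.1 (PySem.Set.ofList p.2)) d).items, List.Nodup q.2 := by
  have hins : ∀ (d : PySem.Dict String (PySem.Set String)) (k : String) (v : PySem.Set String)
      (q : String × PySem.Set String), q ∈ (d.insert k v).items → q.2 = v ∨ q ∈ d.items := by
    intro d k v q hq
    unfold PySem.Dict.insert at hq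
    by_cases hc : d.contains k
    · simp only [hc, if_true] at hq
      rcases List.mem_map.mp hq with ⟨r, hr, hre⟩
      by_cases hk : (r.1 == k) = true
      · rw [hk] at hre
        simp at hre
        left; rw [← hre]
      · rw [Bool.not_eq_true] at hk
        rw [hk] at hre
        simp at hre
        right; rw [← hre]; exact hr
    · simp only [hc] at hq
      simp at hq
      rcases hq with hq | hq
      · right; exact hq
      · left; rw [hq]
  induction l generalizing d with
  | nil => exact hd
  | cons p rest ih =>
    simp only [List.foldl_cons]
    apply ih
    intro q hq
    rcases hins d p.1 (PySem.Set.ofList p.2) q hq with hcase | hcase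
    · rw [hcase]; exact PySem.Set.nodup_ofList p.2
    · exact hd q hcase

-- the per-a count of b equals the intersection size A computes
theorem pvCounts (items : List (String × PySem.Set String))
    (hnd : (items.map Prod.fst).Nodup) (hv : ∀ q ∈ items, List.Nodup q.2)
    (a : List String) (b : String) (v : PySem.Set String) (hb : (b, v) ∈ items) :
    ((a.foldl (fun c entity =>
        (((items.foldl (fun d q =>
            q.2.foldl (fun d entity => d.modify entity [] (fun l => l ++ [q.1])) d)
            (PySem.Dict.empty : PySem.Dict String (List String))).getD entity [])).foldl
          (fun c b_id => c.modify b_id 0 (fun x => x + 1)) c)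
        (PySem.Dict.empty : PySem.Dict String Int)).getD b 0)
      = PySem.Set.len (PySem.Set.inter a v) := by
  rw [pvL4]
  have hempty : (PySem.Dict.empty : PySem.Dict String Int).getD b 0 = 0 := by
    simp [PySem.Dict.empty, PySem.Dict.getD, PySem.Dict.get?]
  rw [hempty, zero_add]
  have hmap : (a.map (fun e =>
      (((((items.foldl (fun d q =>
            q.2.foldl (fun d entity => d.modify entity [] (fun l => l ++ [q.1])) d)
            (PySem.Dict.empty : PySem.Dict String (List String))).getD e [])).count b : Nat) : Int)))
      = a.map (fun e => if (fun e => decide (e ∈ v)) e = true then (1:Int) else 0) := by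
    apply List.map_congr_left
    intro e _
    rw [pvL2 items e]
    have : ((((items.flatMap (fun q => q.2.map (fun ent => (ent, q.1)))).filter
            (fun pr => pr.1 == e)).map (fun pr => pr.2)).count b)
        = ((items.flatMap (fun q => q.2.map (fun ent => (ent, q.1)))).countP
            (fun pr => pr.2 == b && pr.1 == e)) := by
      rw [List.count, List.countP_map, List.countP_filter]
      rfl
    rw [this, pvL3 items b v e hnd hv hb]
    by_cases hev : e ∈ v <;> simp [hev]
  rw [hmap, PySem.List.sum_map_ite_one_zero]
  simp [PySem.Set.inter, PySem.Set.len, List.countP_eq_length_filter]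

-- the two per-item step functions agree, for any b dict with distinct keys and set values
theorem pvStep (S : PySem.Dict String (PySem.Set String)) (hk : S.keys.Nodup)
    (hv : ∀ q ∈ S.items, List.Nodup q.2) (threshold : Int) :
    (fun (acc : List (List String) × List String) (p : List String × String) =>
      ((acc.1 ++ [(PySem.List.slice
            (PySem.List.sorted2
              (S.items.foldl (fun (st : Int × List (Int × String)) q =>
                (if PySem.Set.len (PySem.Set.inter (PySem.Set.ofList p.1) q.2) > st.1
                 then PySem.Set.len (PySem.Set.inter (PySem.Set.ofList p.1) q.2) else st.1,
                 st.2 ++ [(PySem.Set.len (PySem.Set.inter (PySem.Set.ofList p.1) q.2), q.1)]))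
                (0, [])).2
              Prod.fst Prod.snd true) none (some 5)).map Prod.snd],
        if (S.items.foldl (fun (st : Int × List (Int × String)) q =>
                (if PySem.Set.len (PySem.Set.inter (PySem.Set.ofList p.1) q.2) > st.1
                 then PySem.Set.len (PySem.Set.inter (PySem.Set.ofList p.1) q.2) else st.1,
                 st.2 ++ [(PySem.Set.len (PySem.Set.inter (PySem.Set.ofList p.1) q.2), q.1)]))
                (0, [])).1 < threshold
        then acc.2 ++ [p.2] else acc.2) : List (List String) × List String))
    = (fun (acc : List (List String) × List String) (p : List String × String) =>
      ((acc.1 ++ [(PySem.List.slice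
            (PySem.List.sorted2
              (S.keys.map (fun b_id =>
                (((PySem.Set.ofList p.1).foldl (fun c entity =>
                    (((S.items.foldl (fun d q =>
                        q.2.foldl (fun d entity => d.modify entity [] (fun l => l ++ [q.1])) d)
                        (PySem.Dict.empty : PySem.Dict String (List String))).getD entity [])).foldl
                      (fun c b_id => c.modify b_id 0 (fun x => x + 1)) c)
                    (PySem.Dict.empty : PySem.Dict String Int)).getD b_id 0, b_id)))
              Prod.fst Prod.snd true) none (some 5)).map Prod.snd],
        if PySem.List.maxD ((S.keys.map (fun b_id =>
                (((PySem.Set.ofList p.1).foldl (fun c entity =>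
                    (((S.items.foldl (fun d q =>
                        q.2.foldl (fun d entity => d.modify entity [] (fun l => l ++ [q.1])) d)
                        (PySem.Dict.empty : PySem.Dict String (List String))).getD entity [])).foldl
                      (fun c b_id => c.modify b_id 0 (fun x => x + 1)) c)
                    (PySem.Dict.empty : PySem.Dict String Int)).getD b_id 0, b_id))).map Prod.fst)
            (fun c => c) 0 < threshold
        then acc.2 ++ [p.2] else acc.2) : List (List String) × List String)) := by
  funext acc p
  rw [pvL1 S.items (fun s => PySem.Set.len (PySem.Set.inter (PySem.Set.ofList p.1) s)) 0 []]
  have hnd : (S.items.map Prod.fst).Nodup := hk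
  have hscores : S.items.map (fun q =>
        (PySem.Set.len (PySem.Set.inter (PySem.Set.ofList p.1) q.2), q.1))
      = S.keys.map (fun b_id =>
        (((PySem.Set.ofList p.1).foldl (fun c entity =>
            (((S.items.foldl (fun d q =>
                q.2.foldl (fun d entity => d.modify entity [] (fun l => l ++ [q.1])) d)
                (PySem.Dict.empty : PySem.Dict String (List String))).getD entity [])).foldl
              (fun c b_id => c.modify b_id 0 (fun x => x + 1)) c)
            (PySem.Dict.empty : PySem.Dict String Int)).getD b_id 0, b_id)) := by
    conv_lhs => rw [PySem.Dict.items_eq_map_keys S hk ([] : PySem.Set String)]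
    rw [List.map_map]
    apply List.map_congr_left
    intro k hkmem
    have hbv : (k, S.getD k ([] : PySem.Set String)) ∈ S.items := by
      have h1 : (k, S.getD k ([] : PySem.Set String))
          ∈ S.keys.map (fun k => (k, S.getD k ([] : PySem.Set String))) :=
        List.mem_map.mpr ⟨k, hkmem, rfl⟩
      rwa [← PySem.Dict.items_eq_map_keys S hk ([] : PySem.Set String)] at h1
    simp only [Function.comp]
    exact Prod.ext ((pvCounts S.items hnd hv (PySem.Set.ofList p.1) k _ hbv).symm) rfl
  have hmax : ((S.items.map (fun q =>
        PySem.Set.len (PySem.Set.inter (PySem.Set.ofList p.1) q.2))).foldl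
        (fun m c => if c > m then c else m) 0)
      = PySem.List.maxD ((S.keys.map (fun b_id =>
          (((PySem.Set.ofList p.1).foldl (fun c entity =>
              (((S.items.foldl (fun d q =>
                  q.2.foldl (fun d entity => d.modify entity [] (fun l => l ++ [q.1])) d)
                  (PySem.Dict.empty : PySem.Dict String (List String))).getD entity [])).foldl
                (fun c b_id => c.modify b_id 0 (fun x => x + 1)) c)
              (PySem.Dict.empty : PySem.Dict String Int)).getD b_id 0, b_id))).map Prod.fst)
          (fun c => c) 0 := by
    rw [← hscores, List.map_map]
    have hcomp : (Prod.fst ∘ fun q : String × PySem.Set String =>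
        (PySem.Set.len (PySem.Set.inter (PySem.Set.ofList p.1) q.2), q.1))
        = fun q : String × PySem.Set String =>
            PySem.Set.len (PySem.Set.inter (PySem.Set.ofList p.1) q.2) := rfl
    rw [hcomp]
    apply pvL5
    intro x hx
    rcases List.mem_map.mp hx with ⟨q, _, rfl⟩
    simp [PySem.Set.len]
  simp only [List.nil_append]
  rw [hscores, hmax]

-- A = B, stated over the zeta-expanded bodies of the two ports
theorem pvMain (entities_a : List (List String)) (ids_a : List String)
    (entities_b : List (List String)) (ids_b : List String) (threshold : Int) :
    find_top_matches_with_threshold entities_a ids_a entities_b ids_b threshold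
      = find_top_matches_with_threshold_alt entities_a ids_a entities_b ids_b threshold := by
  have hk : ((ids_b.zip entities_b).foldl (fun d p => d.insert p.1 (PySem.Set.ofList p.2))
      (PySem.Dict.empty : PySem.Dict String (PySem.Set String))).keys.Nodup := by
    apply PySem.Dict.nodup_keys_foldl_insert_key
    simp [PySem.Dict.empty, PySem.Dict.keys]
  have hv := pvValsNodup (ids_b.zip entities_b) PySem.Dict.empty
    (by simp [PySem.Dict.empty])
  exact congrArg (fun f => (entities_a.zip ids_a).foldl f
    (([], []) : List (List String) × List String)) (pvStep _ hk hv threshold)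

-- ===== VERDICT (by name: the statement is the Claim_ definition above) =====
theorem find_top_matches_with_threshold_spec : Claim_equal_find_top_matches_with_threshold := by
  intro ea ia eb ib th _
  exact pvMain ea ia eb ib th
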